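-- pv_equiv track=rewrite | github.com/namritaansh02/Airline-Scheduling-Routing | Airline Routing Code and GUI/output_to_GUI.py | processBadWeather
-- ===== SOURCE A (Python) =====
-- def processBadWeather(text):
--     bad_weather = []
--     text = text[text.find('\n')+1:text.find(';')]
--     text = text.split('\n')
--     for i, sentence in enumerate(text):
--         j = 1
--         sentence = sentence[sentence.find(' ')+1:]
--         for word in sentence:
--             if word == '1':
--                 bad_weather.append((i+1, j))
--             if word != ' ':
--                 j += 1
--     return bad_weather
-- ===== SOURCE B (Python) =====
-- def processBadWeather(text):
--     body = text[text.find('\n')+1:text.find(';')]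
--     bad_weather = []
--     for i, line in enumerate(body.split('\n')):
--         row = line[line.find(' ')+1:].replace(' ', '')
--         p = row.find('1')
--         while p != -1:
--             bad_weather.append((i+1, p+1))
--             p = row.find('1', p+1)
--     return bad_weather
-- ===== Notes on version B (the rewrite author's own statement) =====
-- stated objective: faster
-- what changed: Instead of scanning every character with a conditional running column counter, B first deletes spaces with str.replace and then jumps directly between the marked cells with a str.find(sub, start) search loop, so columns are the found positions rather than maintained state; both native string methods run at C speed.
import Mathlib
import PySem

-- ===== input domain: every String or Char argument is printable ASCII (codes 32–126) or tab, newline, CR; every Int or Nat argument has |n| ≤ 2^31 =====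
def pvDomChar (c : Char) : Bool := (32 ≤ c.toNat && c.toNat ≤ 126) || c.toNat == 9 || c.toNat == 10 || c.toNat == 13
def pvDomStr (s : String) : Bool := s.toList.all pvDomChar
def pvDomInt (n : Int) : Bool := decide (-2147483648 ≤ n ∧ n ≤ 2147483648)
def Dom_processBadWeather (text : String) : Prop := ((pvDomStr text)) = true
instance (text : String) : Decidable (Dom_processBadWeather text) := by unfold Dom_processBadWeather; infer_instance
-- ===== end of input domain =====

-- B deletes spaces with str.replace and then jumps between '1's with a str.find
-- search loop instead of scanning every character with a running column counter
-- (objective: alternative).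

-- ===== PORT A =====
-- inner loop body of A: state = (bad_weather so far, j)
def pbwStepA (i : Int) (st : List (Int × Int) × Int) (c : Char) : List (Int × Int) × Int :=
  let st1 := if c == '1' then (st.1 ++ [(i + 1, st.2)], st.2) else st
  if !(c == ' ') then (st1.1, st1.2 + 1) else st1

def processBadWeather (text : String) : List (Int × Int) :=
  let cs := text.toList
  let body := PySem.Chars.slice cs (some (PySem.Chars.find cs ['\n'] + 1)) (some (PySem.Chars.find cs [';']))
  let lines := PySem.Chars.splitOn body ['\n']
  (PySem.List.enumerate lines 0).foldl (fun acc p =>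
    let sentence := PySem.Chars.slice p.2 (some (PySem.Chars.find p.2 [' '] + 1)) none
    (sentence.foldl (pbwStepA p.1) (acc, 1)).1) []

-- ===== PORT B =====
-- B's while loop: p = row.find('1'); while p != -1: append (i+1, p+1); p = row.find('1', p+1)
-- (fuel row.length + 1 bounds the iterations: each found index is strictly larger)
def pbwScan (i : Int) (row : List Char) : Nat → Int → List (Int × Int)
  | 0, _ => []
  | fuel + 1, p =>
    if p = -1 then []
    else (i + 1, p + 1) :: pbwScan i row fuel (PySem.Chars.findFrom row ['1'] (p + 1) none)

def processBadWeather_alt (text : String) : List (Int × Int) :=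
  let cs := text.toList
  let body := PySem.Chars.slice cs (some (PySem.Chars.find cs ['\n'] + 1)) (some (PySem.Chars.find cs [';']))
  (PySem.List.enumerate (PySem.Chars.splitOn body ['\n']) 0).foldl (fun out p =>
    let row := PySem.Chars.replace (PySem.Chars.slice p.2 (some (PySem.Chars.find p.2 [' '] + 1)) none) [' '] []
    out ++ pbwScan p.1 row (row.length + 1) (PySem.Chars.find row ['1'])) []

-- ===== PRECONDITION & SPEC =====
def Spec_processBadWeather (text : String) (out : List (Int × Int)) : Prop := out = processBadWeather_alt text
instance (text : String) (out : List (Int × Int)) : Decidable (Spec_processBadWeather text out) := by unfold Spec_processBadWeather; infer_instance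

-- ===== CLAIM (what is proved, stated in full; the proofs are below) =====
def Claim_equal_processBadWeather : Prop := ∀ (text : String), Dom_processBadWeather text → Spec_processBadWeather text (processBadWeather text)

-- ===== LEMMAS AND PROOFS =====

-- ---- replace(' ', '') is filtering out spaces ----
lemma pbw_repl_go : ∀ (l acc : List Char),
    PySem.Chars.replace.go [' '] [] l.length l acc = acc.reverse ++ l.filter (fun c => !(c == ' ')) := by
  intro l
  induction l with
  | nil => intro acc; simp [PySem.Chars.replace.go]
  | cons c t ih =>
    intro acc
    rw [show (c :: t).length = t.length + 1 from rfl]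
    rw [PySem.Chars.replace.go]
    by_cases h : c = ' '
    · subst h; simp [List.isPrefixOf, ih]
    · rw [if_neg (by simp [List.isPrefixOf]; exact fun e => h e.symm), ih]
      simp [h]

lemma pbw_repl_filter (l : List Char) :
    PySem.Chars.replace l [' '] [] = l.filter (fun c => !(c == ' ')) := by
  rw [PySem.Chars.replace]
  simp [pbw_repl_go]

-- ---- generic facts about single-char search ----
lemma pbw_singleton_infix (l : List Char) : ['1'] <:+: l ↔ '1' ∈ l := by
  constructor
  · intro h; exact h.mem (by simp)
  · intro h
    obtain ⟨s, t, rfl⟩ := List.mem_iff_append.mp h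
    exact ⟨s, t, by simp⟩

lemma pbw_singleton_prefix (l : List Char) : ['1'] <+: l ↔ l.head? = some '1' := by
  cases l <;> simp [List.prefix_cons_iff, eq_comm]

lemma pbw_filter_enum_nil (xs : List Char) (s : Int) (h : '1' ∉ xs) :
    (PySem.List.enumerate xs s).filter (fun q => q.2 == '1') = [] := by
  rw [List.filter_eq_nil_iff]
  intro q hq
  have : q.2 ∈ xs := by
    have := List.mem_map_of_mem (f := fun q : Int × Char => q.2) hq
    rwa [PySem.List.map_snd_enumerate] at this
  simp only [beq_iff_eq]
  intro e; exact h (e ▸ this)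

-- ---- the find-jump loop collects exactly the '1' positions ≥ k ----
lemma pbw_scan_eq : ∀ (fuel : Nat) (row : List Char) (i : Int) (k : Nat),
    k ≤ row.length → row.length + 1 - k ≤ fuel →
    pbwScan i row fuel (PySem.Chars.findFrom row ['1'] (k : Int) none)
      = ((PySem.List.enumerate (row.drop k) (k : Int)).filter (fun q => q.2 == '1')).map
          (fun q => (i + 1, q.1 + 1)) := by
  intro fuel
  induction fuel with
  | zero => intro row i k hk hf; omega
  | succ fuel ih =>
    intro row i k hk hf
    by_cases hneg : PySem.Chars.findFrom row ['1'] (k : Int) none = -1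
    · rw [hneg]
      simp only [pbwScan]
      have hni : ¬ ['1'] <:+: row.drop k :=
        (PySem.Chars.findFrom_natCast_eq_neg_one_iff row ['1'] k hk).mp hneg
      rw [pbw_filter_enum_nil _ _ (fun hm => hni ((pbw_singleton_infix _).mpr hm))]
      simp
    · obtain ⟨hkf, hpre, hmin⟩ := PySem.Chars.findFrom_natCast_spec row ['1'] k hk hneg
      set f := PySem.Chars.findFrom row ['1'] (k : Int) none with hfdef
      have hf0 : 0 ≤ f := le_trans (by exact_mod_cast Int.natCast_nonneg k) hkf
      set m := f.toNat with hm
      have hfm : f = (m : Int) := (Int.toNat_of_nonneg hf0).symm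
      have hkm : k ≤ m := by exact_mod_cast hfm ▸ hkf
      have hhead : row[m]? = some '1' := by
        rw [← List.head?_drop]
        exact (pbw_singleton_prefix _).mp hpre
      have hmlt : m < row.length := by
        by_contra hge
        rw [List.getElem?_eq_none (by omega)] at hhead
        simp at hhead
      clear_value f m
      -- unfold one loop step
      rw [pbwScan, if_neg hneg]
      have hstep : f + 1 = ((m + 1 : Nat) : Int) := by rw [hfm]; push_cast; ring
      have hfuel1 : m + 1 ≤ row.length := hmlt
      have hfuel2 : row.length + 1 - (m + 1) ≤ fuel := by omega
      rw [hstep, ih row i (m + 1) hfuel1 hfuel2]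
      -- decompose the right-hand side
      have hsplit : row.drop k = (row.drop k).take (m - k) ++ row.drop m := by
        conv_lhs => rw [← List.take_append_drop (m - k) (row.drop k)]
        rw [List.drop_drop, Nat.add_sub_cancel' hkm]
      have hseglen : ((row.drop k).take (m - k)).length = m - k := by
        simp [List.length_take, List.length_drop]
        omega
      have hseg : '1' ∉ (row.drop k).take (m - k) := by
        intro hmem
        obtain ⟨j, hj, hje⟩ := List.mem_iff_getElem.mp hmem
        rw [hseglen] at hj
        have hkj : k + j < row.length := by omega
        have hidx : row[k + j]'hkj = '1' := by
          rw [← hje]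
          simp [List.getElem_take, List.getElem_drop]
        have hpj : ['1'] <+: row.drop (k + j) := by
          rw [pbw_singleton_prefix, List.head?_drop, List.getElem?_eq_getElem hkj, hidx]
        exact hmin (k + j) (by omega) (by omega) hpj
      have hgetm : row[m]'hmlt = '1' := by
        rw [List.getElem?_eq_getElem hmlt] at hhead
        injection hhead
      have hdropm : row.drop m = '1' :: row.drop (m + 1) := by
        rw [List.drop_eq_getElem_cons hmlt, hgetm]
      conv_rhs => rw [hsplit, hdropm]
      rw [PySem.List.enumerate_append, List.filter_append,
        pbw_filter_enum_nil _ _ hseg, List.nil_append,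
        PySem.List.enumerate_cons, hseglen]
      have hstart : (k : Int) + ((m - k : Nat) : Int) = (m : Int) := by push_cast [hkm]; ring
      rw [hstart, List.filter_cons_of_pos (by simp), List.map_cons]
      push_cast
      rfl

-- ---- assembling A ----
lemma pbw_enum_shift {α : Type} (xs : List α) (a : Int) :
    ∀ b : Int, PySem.List.enumerate xs (b + a) = (PySem.List.enumerate xs b).map (fun q => (q.1 + a, q.2)) := by
  induction xs with
  | nil => intro b; simp [PySem.List.enumerate]
  | cons x xs ih =>
    intro b
    rw [PySem.List.enumerate_cons, PySem.List.enumerate_cons]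
    simp only [List.map_cons]
    congr 1
    have := ih (b + 1)
    rw [show b + 1 + a = b + a + 1 by ring] at this
    exact this

lemma pbw_row (i : Int) : ∀ (cs : List Char) (acc : List (Int × Int)) (j : Int),
    (cs.foldl (pbwStepA i) (acc, j)).1
      = acc ++ ((PySem.List.enumerate (cs.filter (fun c => !(c == ' '))) j).filter
          (fun q => q.2 == '1')).map (fun q => (i + 1, q.1)) := by
  intro cs
  induction cs with
  | nil => intro acc j; simp
  | cons c cs ih =>
    intro acc j
    by_cases h1 : c = '1'
    · subst h1
      simp only [List.foldl_cons, pbwStepA]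
      norm_num
      rw [ih]
      simp [PySem.List.enumerate_cons]
    · by_cases h2 : c = ' '
      · subst h2
        simp only [List.foldl_cons, pbwStepA]
        norm_num [h1]
        rw [ih]
      · simp only [List.foldl_cons, pbwStepA]
        norm_num [h1, h2]
        exact ih acc (j + 1)

lemma pbw_line (i : Int) (cs : List Char) (acc : List (Int × Int)) :
    (cs.foldl (pbwStepA i) (acc, 1)).1
      = acc ++ ((PySem.List.enumerate (cs.filter (fun c => !(c == ' '))) 0).filter
          (fun q => q.2 == '1')).map (fun q => (i + 1, q.1 + 1)) := by
  rw [pbw_row]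
  have := pbw_enum_shift (cs.filter (fun c => !(c == ' '))) 1 0
  norm_num at this
  rw [this]
  congr 1
  rw [List.filter_map, List.map_map]
  rfl

lemma pbw_outer : ∀ (L : List (Int × List Char)) (acc : List (Int × Int)),
    L.foldl (fun acc p =>
      ((PySem.Chars.slice p.2 (some (PySem.Chars.find p.2 [' '] + 1)) none).foldl (pbwStepA p.1) (acc, 1)).1) acc
    = acc ++ L.flatMap (fun p =>
        let row := (PySem.Chars.slice p.2 (some (PySem.Chars.find p.2 [' '] + 1)) none).filter (fun c => !(c == ' '))
        ((PySem.List.enumerate row 0).filter (fun q => q.2 == '1')).map (fun q => (p.1 + 1, q.1 + 1))) := by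
  intro L
  induction L with
  | nil => intro acc; simp
  | cons p L ih =>
    intro acc
    simp only [List.foldl_cons, List.flatMap_cons]
    rw [pbw_line, ih, List.append_assoc]

-- ---- one line of B in normal form ----
lemma pbw_scan_line (i : Int) (row : List Char) :
    pbwScan i row (row.length + 1) (PySem.Chars.find row ['1'])
      = ((PySem.List.enumerate row 0).filter (fun q => q.2 == '1')).map (fun q => (i + 1, q.1 + 1)) := by
  have h := pbw_scan_eq (row.length + 1) row i 0 (by omega) (by omega)
  simpa using h

-- ===== VERDICT (by name: the statement is the Claim_ definition above) =====
theorem processBadWeather_spec : Claim_equal_processBadWeather := by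
  intro text _
  unfold Spec_processBadWeather processBadWeather processBadWeather_alt
  rw [pbw_outer _ []]
  rw [PySem.List.foldl_append_eq_flatMap]
  simp only [List.nil_append]
  congr 1
  funext p
  rw [pbw_repl_filter, pbw_scan_line]
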